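-- pv_equiv track=rewrite | github.com/bharadwajvyadavalli/coding_markdowns | advanced_algorithms_complete.py | airport_connections
-- ===== SOURCE A (Python) =====
-- def airport_connections(airports, routes, starting_airport):
--     """
--     Airport Connections Problem
--
--     Find the minimum number of new routes needed to make all airports reachable
--     from the starting airport.
--
--     Args:
--         airports: List of airport codes
--         routes: List of [from_airport, to_airport] representing existing routes
--         starting_airport: The starting airport code
--
--     Returns:
--         Minimum number of new routes needed
--
--     Time Complexity: O(A + R) where A is the number of airports, R is the number of routes
--     Space Complexity: O(A + R) for the graph representation
--     """
--     # Build adjacency list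
--     graph = {airport: [] for airport in airports}
--     for from_airport, to_airport in routes:
--         graph[from_airport].append(to_airport)
--
--     # Find strongly connected components using Kosaraju's algorithm
--     def dfs1(node, visited, stack):
--         visited.add(node)
--         for neighbor in graph[node]:
--             if neighbor not in visited:
--                 dfs1(neighbor, visited, stack)
--         stack.append(node)
--
--     def dfs2(node, visited, component):
--         visited.add(node)
--         component.add(node)
--         for neighbor in graph[node]:
--             if neighbor not in visited:
--                 dfs2(neighbor, visited, component)
--
--     # First DFS to fill stack
--     visited = set()
--     stack = []
--     for airport in airports:
--         if airport not in visited: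
--             dfs1(airport, visited, stack)
--
--     # Build reverse graph
--     reverse_graph = {airport: [] for airport in airports}
--     for from_airport, to_airport in routes:
--         reverse_graph[to_airport].append(from_airport)
--
--     # Second DFS to find SCCs
--     visited = set()
--     sccs = []
--     while stack:
--         node = stack.pop()
--         if node not in visited:
--             component = set()
--             dfs2(node, visited, component)
--             sccs.append(component)
--
--     # Find which SCCs are reachable from starting airport
--     starting_scc = None
--     for scc in sccs:
--         if starting_airport in scc:
--             starting_scc = scc
--             break
--
--     if not starting_scc:
--         return len(airports) - 1  # Need to connect to all other airports
--
--     # Count unreachable SCCs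
--     unreachable_sccs = 0
--     for scc in sccs:
--         if scc != starting_scc:
--             unreachable_sccs += 1
--
--     return unreachable_sccs
-- ===== SOURCE B (Python) =====
-- def _dfs(graph, root, visited, order):
--     """Iterative DFS from root: marks reachable-unvisited nodes and appends
--     them to order in post-order (finish order)."""
--     visited.add(root)
--     stack = [(root, iter(graph[root]))]
--     while stack:
--         node, it = stack[-1]
--         pushed = False
--         for nb in it:
--             if nb not in visited:
--                 visited.add(nb)
--                 stack.append((nb, iter(graph[nb])))
--                 pushed = True
--                 break
--         if not pushed:
--             order.append(node)
--             stack.pop()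
--
--
-- def airport_connections(airports, routes, starting_airport):
--     graph = {airport: [] for airport in airports}
--     for from_airport, to_airport in routes:
--         graph[from_airport].append(to_airport)
--
--     # First pass: DFS finish order over the whole graph.
--     visited = set()
--     order = []
--     for airport in airports:
--         if airport not in visited:
--             _dfs(graph, airport, visited, order)
--
--     # Second pass: count DFS trees when sweeping in reverse finish order.
--     visited = set()
--     trees = 0
--     for node in reversed(order):
--         if node not in visited:
--             trees += 1
--             _dfs(graph, node, visited, [])
--
--     if starting_airport not in graph:
--         return len(airports) - 1
--     return trees - 1
-- ===== Notes on version B (the rewrite author's own statement) =====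
-- stated objective: alternative
-- what changed: B replaces A's two recursive DFS functions, the unused reverse-graph construction, the per-component sets and the final set-equality counting scan by a single explicit-stack iterative DFS helper used for both passes, a plain tree counter for the second pass, and a dictionary key-membership test for the starting airport.
import Mathlib
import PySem

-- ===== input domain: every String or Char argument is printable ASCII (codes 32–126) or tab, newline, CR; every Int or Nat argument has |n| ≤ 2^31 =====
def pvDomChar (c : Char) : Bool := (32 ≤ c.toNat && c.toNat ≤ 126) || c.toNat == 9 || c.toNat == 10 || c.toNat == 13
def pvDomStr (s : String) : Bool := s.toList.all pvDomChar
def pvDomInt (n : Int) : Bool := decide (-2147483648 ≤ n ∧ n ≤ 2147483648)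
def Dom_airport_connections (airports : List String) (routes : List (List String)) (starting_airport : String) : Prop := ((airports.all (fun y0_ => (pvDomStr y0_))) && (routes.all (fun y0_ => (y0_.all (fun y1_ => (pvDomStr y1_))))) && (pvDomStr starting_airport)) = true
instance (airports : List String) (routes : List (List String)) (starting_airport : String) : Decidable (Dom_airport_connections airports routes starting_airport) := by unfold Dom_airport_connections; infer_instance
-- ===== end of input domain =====

-- B replaces A's two recursive Kosaraju passes (with reverse graph, per-component sets and a
-- component-equality counting scan) by one explicit-stack iterative DFS helper used for both
-- passes, a tree counter and a key-membership test; objective: simpler, same asymptotic cost.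

-- ===== PORT A =====
-- graph = {airport: [] for airport in airports}
def pvBuildGraph (airports : List String) : PySem.Dict String (List String) :=
  airports.foldl (fun d a => d.insert a []) PySem.Dict.empty

-- for from_airport, to_airport in routes: graph[from_airport].append(to_airport)
-- (a route that is not a 2-list, or one referencing a missing key, raises in Python: outside Pre_)
def pvAddRoutes (g : PySem.Dict String (List String)) (routes : List (List String)) :
    PySem.Dict String (List String) :=
  routes.foldl (fun g r =>
    match r with
    | [f, t] => g.modify f [] (fun l => l ++ [t])
    | _ => g) g

-- reverse_graph (A builds it, but its dfs2 reads `graph`, so it is dead apart from KeyErrors)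
def pvAddRoutesRev (g : PySem.Dict String (List String)) (routes : List (List String)) :
    PySem.Dict String (List String) :=
  routes.foldl (fun g r =>
    match r with
    | [f, t] => g.modify t [] (fun l => l ++ [f])
    | _ => g) g

mutual
-- def dfs1(node, visited, stack): the fuel argument only makes the recursion total;
-- calls below pass fuel > number of unvisited keys, which is never exhausted
def pvDfs1 (g : PySem.Dict String (List String)) :
    Nat → String → PySem.Set String → List String → PySem.Set String × List String
  | 0, _, visited, stack => (visited, stack)
  | fuel + 1, node, visited, stack =>
      let p := pvLoop1 g fuel (g.getD node []) (PySem.Set.add visited node) stack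
      (p.1, p.2 ++ [node])
  termination_by fuel _ _ _ => (fuel, 0)
-- for neighbor in graph[node]: if neighbor not in visited: dfs1(neighbor, visited, stack)
def pvLoop1 (g : PySem.Dict String (List String)) :
    Nat → List String → PySem.Set String → List String → PySem.Set String × List String
  | _, [], visited, stack => (visited, stack)
  | fuel, nb :: rest, visited, stack =>
      if nb ∈ visited then pvLoop1 g fuel rest visited stack
      else
        let p := pvDfs1 g fuel nb visited stack
        pvLoop1 g fuel rest p.1 p.2
  termination_by fuel ns _ _ => (fuel, ns.length + 1)
end

mutual
-- def dfs2(node, visited, component)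
def pvDfs2 (g : PySem.Dict String (List String)) :
    Nat → String → PySem.Set String → PySem.Set String → PySem.Set String × PySem.Set String
  | 0, _, visited, comp => (visited, comp)
  | fuel + 1, node, visited, comp =>
      pvLoop2 g fuel (g.getD node []) (PySem.Set.add visited node) (PySem.Set.add comp node)
  termination_by fuel _ _ _ => (fuel, 0)
def pvLoop2 (g : PySem.Dict String (List String)) :
    Nat → List String → PySem.Set String → PySem.Set String → PySem.Set String × PySem.Set String
  | _, [], visited, comp => (visited, comp)
  | fuel, nb :: rest, visited, comp =>
      if nb ∈ visited then pvLoop2 g fuel rest visited comp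
      else
        let p := pvDfs2 g fuel nb visited comp
        pvLoop2 g fuel rest p.1 p.2
  termination_by fuel ns _ _ => (fuel, ns.length + 1)
end

-- while stack: node = stack.pop(); if node not in visited: dfs2 …; sccs.append(component)
-- (the argument list is the stack read back-to-front)
def pvPass2 (g : PySem.Dict String (List String)) (fuel : Nat) :
    List String → PySem.Set String → List (PySem.Set String) →
    PySem.Set String × List (PySem.Set String)
  | [], visited, sccs => (visited, sccs)
  | node :: rest, visited, sccs =>
      if node ∈ visited then pvPass2 g fuel rest visited sccs
      else
        let p := pvDfs2 g fuel node visited PySem.Set.empty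
        pvPass2 g fuel rest p.1 (sccs ++ [p.2])

def airport_connections (airports : List String) (routes : List (List String))
    (starting_airport : String) : Int :=
  let graph := pvAddRoutes (pvBuildGraph airports) routes
  let fuel := graph.keys.length + 1
  -- first DFS to fill stack
  let p1 := airports.foldl
    (fun (st : PySem.Set String × List String) airport =>
      if airport ∈ st.1 then st else pvDfs1 graph fuel airport st.1 st.2)
    (PySem.Set.empty, [])
  -- build reverse graph (unused afterwards, as in A)
  let _reverse_graph := pvAddRoutesRev (pvBuildGraph airports) routes
  -- second DFS to find "SCCs"
  let p2 := pvPass2 graph fuel p1.2.reverse PySem.Set.empty []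
  -- find the SCC containing the starting airport
  let starting_scc := p2.2.find? (fun scc => PySem.Set.contains scc starting_airport)
  match starting_scc with
  | none => (airports.length : Int) - 1
  | some scc0 =>
      if scc0.isEmpty then (airports.length : Int) - 1   -- `if not starting_scc` (empty-set falsy)
      else p2.2.foldl (fun n scc => if PySem.Set.equal scc scc0 then n else n + 1) (0 : Int)

-- ===== PORT B =====
-- number of keys of g not yet in v (termination measure of the iterative DFS)
def pvUnvis (ks : List String) (v : PySem.Set String) : Nat :=
  (ks.filter (fun k => !(PySem.Set.contains v k))).length

lemma pvUnvis_eq_countP (ks : List String) (v : PySem.Set String) :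
    pvUnvis ks v = ks.countP (fun k => decide (k ∉ v)) := by
  unfold pvUnvis
  rw [List.countP_eq_length_filter]
  congr 1
  apply List.filter_congr
  intro x _
  simp [PySem.Set.contains_eq_listContains]

lemma pvUnvis_add_lt (ks : List String) (v : PySem.Set String) (nb : String)
    (hk : nb ∈ ks) (hv : nb ∉ v) :
    pvUnvis ks (PySem.Set.add v nb) < pvUnvis ks v := by
  rw [pvUnvis_eq_countP, pvUnvis_eq_countP]
  induction ks with
  | nil => simp at hk
  | cons a t ih =>
      rw [List.countP_cons, List.countP_cons]
      by_cases ha : a = nb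
      · subst ha
        have h1 : (decide (a ∉ PySem.Set.add v a)) = false := by
          simp [PySem.Set.mem_add]
        have h2 : (decide (a ∉ v)) = true := by simp [hv]
        have hle : t.countP (fun k => decide (k ∉ PySem.Set.add v a)) ≤
            t.countP (fun k => decide (k ∉ v)) := by
          apply List.countP_mono_left
          intro x _ hx
          simp only [decide_eq_true_eq, PySem.Set.mem_add] at hx ⊢
          exact fun hxv => hx (Or.inl hxv)
        rw [h1, h2]
        simp only [if_true, if_false, Bool.false_eq_true]
        omega
      · have hk' : nb ∈ t := by
          rcases List.mem_cons.1 hk with h | h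
          · exact absurd h.symm ha
          · exact h
        have heq : (decide (a ∉ PySem.Set.add v nb)) = (decide (a ∉ v)) := by
          simp only [decide_eq_decide, PySem.Set.mem_add]
          constructor
          · intro h hav; exact h (Or.inl hav)
          · intro h hav; rcases hav with h1 | h1
            · exact h h1
            · exact ha h1
        rw [heq]
        have := ih hk'
        omega

lemma pvMemKeys_of_get? (g : PySem.Dict String (List String)) (nb : String)
    (l : List String) (h : g.get? nb = some l) : nb ∈ g.keys := by
  by_contra hc
  rw [(PySem.Dict.get?_eq_none_iff_not_mem_keys g nb).2 hc] at h
  simp at h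

-- the explicit DFS stack of Source B's _dfs: frames (node, remaining neighbours)
def pvDfsIter (g : PySem.Dict String (List String)) :
    List (String × List String) → PySem.Set String → List String →
    PySem.Set String × List String
  | [], visited, order => (visited, order)
  | (node, ns) :: rest, visited, order =>
      match ns with
      | [] => pvDfsIter g rest visited (order ++ [node])           -- not pushed: finish node, pop
      | nb :: ns' =>
          if nb ∈ visited then pvDfsIter g ((node, ns') :: rest) visited order
          else
            match hg : g.get? nb with
            | some l => pvDfsIter g ((nb, l) :: (node, ns') :: rest)
                          (PySem.Set.add visited nb) order          -- mark, push, descend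
            | none => pvDfsIter g ((node, ns') :: rest) visited order  -- Python: KeyError (outside Pre_)
  termination_by frames visited _ =>
    (pvUnvis g.keys visited, (frames.map (fun f => f.2.length + 1)).sum)
  decreasing_by
  · apply Prod.Lex.right; simp
  · apply Prod.Lex.right; simp
  · apply Prod.Lex.left
    exact pvUnvis_add_lt _ _ _ (pvMemKeys_of_get? g nb l hg) (by assumption)
  · apply Prod.Lex.right; simp

-- def _dfs(graph, root, visited, order)
def pvDfsFrom (g : PySem.Dict String (List String)) (root : String)
    (visited : PySem.Set String) (order : List String) : PySem.Set String × List String :=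
  pvDfsIter g [(root, g.getD root [])] (PySem.Set.add visited root) order

def airport_connections_alt (airports : List String) (routes : List (List String))
    (starting_airport : String) : Int :=
  let graph := pvAddRoutes (pvBuildGraph airports) routes
  let p1 := airports.foldl
    (fun (st : PySem.Set String × List String) airport =>
      if airport ∈ st.1 then st else pvDfsFrom graph airport st.1 st.2)
    (PySem.Set.empty, [])
  let p2 := p1.2.reverse.foldl
    (fun (st : PySem.Set String × Int) node =>
      if node ∈ st.1 then st else ((pvDfsFrom graph node st.1 []).1, st.2 + 1))
    (PySem.Set.empty, (0 : Int))
  if graph.contains starting_airport then p2.2 - 1 else (airports.length : Int) - 1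

-- ===== PRECONDITION & SPEC =====
-- Pre_ excludes exactly the inputs on which A raises: a route that is not a 2-element list
-- (ValueError on unpacking) or that mentions an airport outside `airports` (KeyError).
def Pre_airport_connections (airports : List String) (routes : List (List String))
    (starting_airport : String) : Prop :=
  ∀ r ∈ routes, r.length = 2 ∧ ∀ x ∈ r, x ∈ airports

instance (airports : List String) (routes : List (List String)) (starting_airport : String) :
    Decidable (Pre_airport_connections airports routes starting_airport) := by
  unfold Pre_airport_connections; infer_instance

def pvWitness_airport_connections : List String × List (List String) × String :=
  (["JFK", "LGA", "SFO"], [["JFK", "LGA"], ["LGA", "JFK"], ["JFK", "SFO"]], "JFK")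

def Spec_airport_connections (airports : List String) (routes : List (List String)) (starting_airport : String) (out : Int) : Prop := out = airport_connections_alt airports routes starting_airport
instance (airports : List String) (routes : List (List String)) (starting_airport : String) (out : Int) : Decidable (Spec_airport_connections airports routes starting_airport out) := by unfold Spec_airport_connections; infer_instance

-- ===== CLAIM (what is proved, stated in full; the proofs are below) =====
def Claim_equal_airport_connections : Prop := ∀ (airports : List String) (routes : List (List String)) (starting_airport : String), Dom_airport_connections airports routes starting_airport → Pre_airport_connections airports routes starting_airport → Spec_airport_connections airports routes starting_airport (airport_connections airports routes starting_airport)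

-- ===== LEMMAS AND PROOFS =====

lemma pvUnvis_mono (ks : List String) (v w : PySem.Set String)
    (h : ∀ x, x ∈ v → x ∈ w) : pvUnvis ks w ≤ pvUnvis ks v := by
  rw [pvUnvis_eq_countP, pvUnvis_eq_countP]
  apply List.countP_mono_left
  intro x _ hx
  simp only [decide_eq_true_eq] at hx ⊢
  exact fun hxv => hx (h x hxv)

-- `g` sends every key to a list of keys (true for the Pre_-built graph)
def pvGood (g : PySem.Dict String (List String)) : Prop :=
  ∀ k x, x ∈ PySem.Dict.getD g k [] → x ∈ g.keys

lemma pvUnvis_le_length (ks : List String) (v : PySem.Set String) :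
    pvUnvis ks v ≤ ks.length := by
  rw [pvUnvis_eq_countP]; exact List.countP_le_length

lemma pvUnvis_pos (ks : List String) (v : PySem.Set String) (nb : String)
    (hk : nb ∈ ks) (hv : nb ∉ v) : 0 < pvUnvis ks v := by
  rw [pvUnvis_eq_countP]
  exact List.countP_pos_iff.2 ⟨nb, hk, by simpa using hv⟩

lemma pvGet?_some_of_mem_keys (g : PySem.Dict String (List String)) (x : String)
    (h : x ∈ g.keys) : ∃ l, g.get? x = some l := by
  cases hg : g.get? x with
  | none => exact absurd ((PySem.Dict.get?_eq_none_iff_not_mem_keys g x).1 hg) (by simp [h])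
  | some l => exact ⟨l, rfl⟩

lemma pvGetD_of_get? (g : PySem.Dict String (List String)) (x : String) (l : List String)
    (h : g.get? x = some l) : PySem.Dict.getD g x [] = l := by
  rw [PySem.Dict.getD_eq_get?_getD, h]; rfl

-- the graph built by both programs: its keys are exactly the airports, neighbours are keys
lemma pvBuild_getD (l : List String) :
    ∀ (d : PySem.Dict String (List String)), (∀ k, PySem.Dict.getD d k [] = []) →
    ∀ k, PySem.Dict.getD (l.foldl (fun d a => d.insert a []) d) k [] = [] := by
  induction l with
  | nil => intro d hd k; simpa using hd k
  | cons a t ih =>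
      intro d hd k
      rw [List.foldl_cons]
      refine ih _ (fun k' => ?_) k
      rw [PySem.Dict.getD_insert]
      split <;> simp [hd]

lemma pvAddRoutes_facts (airports : List String) :
    ∀ (routes : List (List String)) (g0 : PySem.Dict String (List String)),
    (∀ x, x ∈ g0.keys ↔ x ∈ airports) →
    (∀ k x, x ∈ PySem.Dict.getD g0 k [] → x ∈ airports) →
    (∀ r ∈ routes, r.length = 2 ∧ ∀ x ∈ r, x ∈ airports) →
    (∀ x, x ∈ (pvAddRoutes g0 routes).keys ↔ x ∈ airports) ∧
    (∀ k x, x ∈ PySem.Dict.getD (pvAddRoutes g0 routes) k [] → x ∈ airports) := by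
  intro routes
  induction routes with
  | nil => intro g0 hk hg _; exact ⟨hk, hg⟩
  | cons r rs ih =>
      intro g0 hk hg hPre
      obtain ⟨hlen, hmem⟩ := hPre r (List.mem_cons_self)
      obtain ⟨f, t, rfl⟩ : ∃ f t, r = [f, t] := by
        match r, hlen with
        | [f, t], _ => exact ⟨f, t, rfl⟩
      have hf : f ∈ airports := hmem f (by simp)
      have ht : t ∈ airports := hmem t (by simp)
      have step : pvAddRoutes g0 ([f, t] :: rs) =
          pvAddRoutes (g0.modify f [] (fun l => l ++ [t])) rs := rfl
      rw [step]
      refine ih _ (fun x => ?_) (fun k x hx => ?_)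
          (fun r hr => hPre r (List.mem_cons_of_mem _ hr))
      · rw [← PySem.Dict.contains_iff_mem_keys, PySem.Dict.contains_modify,
          Bool.or_eq_true, beq_iff_eq, PySem.Dict.contains_iff_mem_keys, hk]
        constructor
        · rintro (rfl | h); exacts [hf, h]
        · intro h; exact Or.inr h
      · rw [PySem.Dict.getD_modify] at hx
        split at hx
        · rcases List.mem_append.1 hx with h | h
          · exact hg _ _ h
          · simpa using (List.mem_singleton.1 h) ▸ ht
        · exact hg _ _ hx

lemma pvGraph_facts (airports : List String) (routes : List (List String))
    (hPre : ∀ r ∈ routes, r.length = 2 ∧ ∀ x ∈ r, x ∈ airports) :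
    (∀ x, x ∈ (pvAddRoutes (pvBuildGraph airports) routes).keys ↔ x ∈ airports) ∧
    pvGood (pvAddRoutes (pvBuildGraph airports) routes) := by
  have hbk : ∀ x, x ∈ (pvBuildGraph airports).keys ↔ x ∈ airports := by
    intro x
    unfold pvBuildGraph
    rw [PySem.Dict.keys_foldl_insert (f := fun _ _ => [])]
    rw [show (PySem.Dict.empty : PySem.Dict String (List String)).keys = [] from rfl]
    rw [PySem.Set.update_nil_left, PySem.Set.mem_ofList]
  have hbg : ∀ k x, x ∈ PySem.Dict.getD (pvBuildGraph airports) k [] → x ∈ airports := by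
    intro k x hx
    unfold pvBuildGraph at hx
    rw [pvBuild_getD airports PySem.Dict.empty (fun k => by simp [PySem.Dict.getD_empty])] at hx
    simp at hx
  obtain ⟨h1, h2⟩ := pvAddRoutes_facts airports routes _ hbk hbg hPre
  exact ⟨h1, fun k x hx => (h1 x).2 (h2 k x hx)⟩

-- PARALLEL SHAPE: one Kosaraju DFS call extends `visited` by a block π of fresh keys,
-- appends a block δ with the same members to the finish stack, and dfs2's component
-- receives exactly π.
lemma pvShape_loop (g : PySem.Dict String (List String)) (hGood : pvGood g) :
    ∀ (n : Nat) (v : PySem.Set String), pvUnvis g.keys v ≤ n →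
    ∀ (ns : List String), (∀ x ∈ ns, x ∈ g.keys) →
    ∀ (fuel : Nat), pvUnvis g.keys v ≤ fuel →
    ∀ (st : List String) (comp : PySem.Set String), (∀ x ∈ comp, x ∈ v) →
    ∃ π δ,
      pvLoop1 g fuel ns v st = (v ++ π, st ++ δ) ∧
      pvLoop2 g fuel ns v comp = (v ++ π, comp ++ π) ∧
      (∀ x, x ∈ π ↔ x ∈ δ) ∧ (∀ x ∈ π, x ∈ g.keys ∧ x ∉ v) := by
  intro n
  induction n using Nat.strong_induction_on with
  | _ n IH =>
  intro v hvn ns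
  induction ns with
  | nil =>
      intro _ fuel hfuel st comp hcomp
      exact ⟨[], [], by simp [pvLoop1], by simp [pvLoop2], by simp, by simp⟩
  | cons nb rest ihns =>
      intro hns fuel hfuel st comp hcomp
      have hnbk : nb ∈ g.keys := hns nb (by simp)
      have hrest : ∀ x ∈ rest, x ∈ g.keys := fun x hx => hns x (by simp [hx])
      by_cases hnb : nb ∈ v
      · obtain ⟨π, δ, h1, h2, h3, h4⟩ := ihns hrest fuel hfuel st comp hcomp
        exact ⟨π, δ, by simp only [pvLoop1, if_pos hnb]; exact h1,
          by simp only [pvLoop2, if_pos hnb]; exact h2, h3, h4⟩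
      · have hpos : 0 < pvUnvis g.keys v := pvUnvis_pos _ _ _ hnbk hnb
        obtain ⟨m, rfl⟩ : ∃ m, fuel = m + 1 := ⟨fuel - 1, by omega⟩
        have hlt : pvUnvis g.keys (PySem.Set.add v nb) < pvUnvis g.keys v :=
          pvUnvis_add_lt _ _ _ hnbk hnb
        have hvadd : PySem.Set.add v nb = v ++ [nb] := PySem.Set.add_of_not_mem hnb
        have hcompadd : PySem.Set.add comp nb = comp ++ [nb] :=
          PySem.Set.add_of_not_mem (fun hc => hnb (hcomp nb hc))
        obtain ⟨π₀, δ₀, e1, e2, e3, e4⟩ :=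
          IH (n - 1) (by omega) (PySem.Set.add v nb) (by omega)
            (PySem.Dict.getD g nb []) (fun x hx => hGood nb x hx)
            m (by omega) st (PySem.Set.add comp nb)
            (by intro x hx
                rw [hcompadd] at hx
                rw [PySem.Set.mem_add]
                rcases List.mem_append.1 hx with h | h
                · exact Or.inl (hcomp x h)
                · exact Or.inr (List.mem_singleton.1 h))
        have d1 : pvDfs1 g (m+1) nb v st = (v ++ ([nb] ++ π₀), st ++ (δ₀ ++ [nb])) := by
          simp only [pvDfs1]
          rw [e1, hvadd]
          simp
        have d2 : pvDfs2 g (m+1) nb v comp = (v ++ ([nb] ++ π₀), comp ++ ([nb] ++ π₀)) := by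
          simp only [pvDfs2]
          rw [e2, hvadd, hcompadd]
          simp
        have hsub2 : ∀ x, x ∈ PySem.Set.add v nb → x ∈ v ++ ([nb] ++ π₀) := by
          intro x hx
          rw [hvadd] at hx
          rcases List.mem_append.1 hx with h | h
          · exact List.mem_append.2 (Or.inl h)
          · exact List.mem_append.2 (Or.inr (List.mem_append.2 (Or.inl h)))
        have hlt2 : pvUnvis g.keys (v ++ ([nb] ++ π₀)) < pvUnvis g.keys v :=
          lt_of_le_of_lt (pvUnvis_mono _ _ _ hsub2) hlt
        obtain ⟨π₁, δ₁, f1, f2, f3, f4⟩ :=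
          IH (n - 1) (by omega) (v ++ ([nb] ++ π₀)) (by omega) rest hrest
            (m + 1) (by omega) (st ++ (δ₀ ++ [nb])) (comp ++ ([nb] ++ π₀))
            (by intro x hx
                rcases List.mem_append.1 hx with h | h
                · exact List.mem_append.2 (Or.inl (hcomp x h))
                · exact List.mem_append.2 (Or.inr h))
        refine ⟨[nb] ++ (π₀ ++ π₁), δ₀ ++ ([nb] ++ δ₁), ?_, ?_, ?_, ?_⟩
        · simp only [pvLoop1, if_neg hnb]
          rw [d1, f1]
          simp
        · simp only [pvLoop2, if_neg hnb]
          rw [d2, f2]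
          simp
        · intro x
          simp only [List.mem_append, List.mem_singleton]
          constructor
          · rintro (rfl | h | h)
            · exact Or.inr (Or.inl rfl)
            · exact Or.inl ((e3 x).1 h)
            · exact Or.inr (Or.inr ((f3 x).1 h))
          · rintro (h | rfl | h)
            · exact Or.inr (Or.inl ((e3 x).2 h))
            · exact Or.inl rfl
            · exact Or.inr (Or.inr ((f3 x).2 h))
        · intro x hx
          rcases List.mem_append.1 hx with h | h
          · rw [List.mem_singleton] at h
            subst h
            exact ⟨hnbk, hnb⟩
          · rcases List.mem_append.1 h with h | h
            · obtain ⟨hk, hnv⟩ := e4 x h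
              refine ⟨hk, fun hxv => hnv ?_⟩
              rw [PySem.Set.mem_add]
              exact Or.inl hxv
            · obtain ⟨hk, hnv⟩ := f4 x h
              exact ⟨hk, fun hxv => hnv (List.mem_append.2 (Or.inl hxv))⟩

lemma pvShape_dfs (g : PySem.Dict String (List String)) (hGood : pvGood g)
    (root : String) (v : PySem.Set String) (st : List String) (comp : PySem.Set String)
    (hroot : root ∈ g.keys) (hv : root ∉ v) (hcomp : ∀ x ∈ comp, x ∈ v) :
    ∃ π δ,
      pvDfs1 g (g.keys.length + 1) root v st = (v ++ π, st ++ δ) ∧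
      pvDfs2 g (g.keys.length + 1) root v comp = (v ++ π, comp ++ π) ∧
      (∀ x, x ∈ π ↔ x ∈ δ) ∧ (∀ x ∈ π, x ∈ g.keys ∧ x ∉ v) ∧ root ∈ π := by
  have hvadd : PySem.Set.add v root = v ++ [root] := PySem.Set.add_of_not_mem hv
  have hcompadd : PySem.Set.add comp root = comp ++ [root] :=
    PySem.Set.add_of_not_mem (fun hc => hv (hcomp root hc))
  obtain ⟨π₀, δ₀, e1, e2, e3, e4⟩ :=
    pvShape_loop g hGood (pvUnvis g.keys (PySem.Set.add v root)) (PySem.Set.add v root)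
      le_rfl (PySem.Dict.getD g root []) (fun x hx => hGood root x hx)
      g.keys.length (pvUnvis_le_length _ _) st (PySem.Set.add comp root)
      (by intro x hx
          rw [hcompadd] at hx
          rw [PySem.Set.mem_add]
          rcases List.mem_append.1 hx with h | h
          · exact Or.inl (hcomp x h)
          · exact Or.inr (List.mem_singleton.1 h))
  refine ⟨[root] ++ π₀, δ₀ ++ [root], ?_, ?_, ?_, ?_, by simp⟩
  · simp only [pvDfs1]
    rw [e1, hvadd]
    simp
  · simp only [pvDfs2]
    rw [e2, hvadd, hcompadd]
    simp
  · intro x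
    simp only [List.mem_append, List.mem_singleton]
    constructor
    · rintro (rfl | h)
      · exact Or.inr rfl
      · exact Or.inl ((e3 x).1 h)
    · rintro (h | rfl)
      · exact Or.inr ((e3 x).2 h)
      · exact Or.inl rfl
  · intro x hx
    rcases List.mem_append.1 hx with h | h
    · rw [List.mem_singleton] at h
      subst h
      exact ⟨hroot, hv⟩
    · obtain ⟨hk, hnv⟩ := e4 x h
      refine ⟨hk, fun hxv => hnv ?_⟩
      rw [PySem.Set.mem_add]
      exact Or.inl hxv

-- SIMULATION: Source B's explicit frame stack runs A's recursive dfs1 frame by frame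
lemma pvSim (g : PySem.Dict String (List String)) (hGood : pvGood g) :
    ∀ (n : Nat) (v : PySem.Set String), pvUnvis g.keys v ≤ n →
    ∀ (ns : List String), (∀ x ∈ ns, x ∈ g.keys) →
    ∀ (fuel : Nat), pvUnvis g.keys v ≤ fuel →
    ∀ (node : String) (rest : List (String × List String)) (ord : List String),
    pvDfsIter g ((node, ns) :: rest) v ord =
      pvDfsIter g rest (pvLoop1 g fuel ns v ord).1 ((pvLoop1 g fuel ns v ord).2 ++ [node]) := by
  intro n
  induction n using Nat.strong_induction_on with
  | _ n IH =>
  intro v hvn ns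
  induction ns with
  | nil =>
      intro _ fuel hfuel node rest ord
      simp [pvDfsIter, pvLoop1]
  | cons nb ns' ihns =>
      intro hns fuel hfuel node rest ord
      have hnbk : nb ∈ g.keys := hns nb (by simp)
      have hns' : ∀ x ∈ ns', x ∈ g.keys := fun x hx => hns x (by simp [hx])
      by_cases hnb : nb ∈ v
      · have lhs : pvDfsIter g ((node, nb :: ns') :: rest) v ord
            = pvDfsIter g ((node, ns') :: rest) v ord := by
          simp only [pvDfsIter, if_pos hnb]
        have rhs : pvLoop1 g fuel (nb :: ns') v ord = pvLoop1 g fuel ns' v ord := by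
          simp only [pvLoop1, if_pos hnb]
        rw [lhs, rhs, ihns hns' fuel hfuel node rest ord]
      · obtain ⟨l, hl⟩ := pvGet?_some_of_mem_keys g nb hnbk
        have hgetD : PySem.Dict.getD g nb [] = l := pvGetD_of_get? g nb l hl
        have hlk : ∀ x ∈ l, x ∈ g.keys := fun x hx => hGood nb x (hgetD ▸ hx)
        have hpos : 0 < pvUnvis g.keys v := pvUnvis_pos _ _ _ hnbk hnb
        obtain ⟨m, rfl⟩ : ∃ m, fuel = m + 1 := ⟨fuel - 1, by omega⟩
        have hlt : pvUnvis g.keys (PySem.Set.add v nb) < pvUnvis g.keys v :=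
          pvUnvis_add_lt _ _ _ hnbk hnb
        have lhs : pvDfsIter g ((node, nb :: ns') :: rest) v ord
            = pvDfsIter g ((nb, l) :: (node, ns') :: rest) (PySem.Set.add v nb) ord := by
          simp only [pvDfsIter, if_neg hnb]
          split
          · next l' heq => rw [hl] at heq; cases heq; rfl
          · next heq => rw [hl] at heq; cases heq
        have e1 := IH (n - 1) (by omega) (PySem.Set.add v nb) (by omega) l hlk
          m (by omega) nb ((node, ns') :: rest) ord
        obtain ⟨π₀, δ₀, p1, _, _, _⟩ :=
          pvShape_loop g hGood (pvUnvis g.keys (PySem.Set.add v nb)) (PySem.Set.add v nb)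
            le_rfl l hlk m (by omega) ord PySem.Set.empty
            (by intro x hx; simp [PySem.Set.empty] at hx)
        have hsub2 : ∀ x, x ∈ PySem.Set.add v nb → x ∈ (pvLoop1 g m l (PySem.Set.add v nb) ord).1 := by
          rw [p1]
          intro x hx
          exact List.mem_append.2 (Or.inl hx)
        have hlt2 : pvUnvis g.keys (pvLoop1 g m l (PySem.Set.add v nb) ord).1
            < pvUnvis g.keys v :=
          lt_of_le_of_lt (pvUnvis_mono _ _ _ hsub2) hlt
        have e2 := IH (n - 1) (by omega) (pvLoop1 g m l (PySem.Set.add v nb) ord).1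
          (by omega) ns' hns' (m + 1) (by omega) node rest
          ((pvLoop1 g m l (PySem.Set.add v nb) ord).2 ++ [nb])
        have rhs : pvLoop1 g (m + 1) (nb :: ns') v ord
            = pvLoop1 g (m + 1) ns' (pvLoop1 g m l (PySem.Set.add v nb) ord).1
                ((pvLoop1 g m l (PySem.Set.add v nb) ord).2 ++ [nb]) := by
          simp only [pvLoop1, if_neg hnb, pvDfs1, hgetD]
        rw [lhs, e1, e2, rhs]

-- hence Source B's _dfs equals A's dfs1 at the fuel A's port uses
lemma pvDfsFrom_eq_dfs1 (g : PySem.Dict String (List String)) (hGood : pvGood g)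
    (root : String) (v : PySem.Set String) (ord : List String) :
    pvDfsFrom g root v ord = pvDfs1 g (g.keys.length + 1) root v ord := by
  unfold pvDfsFrom
  rw [pvSim g hGood (pvUnvis g.keys (PySem.Set.add v root)) (PySem.Set.add v root) le_rfl
    (PySem.Dict.getD g root []) (fun x hx => hGood root x hx)
    g.keys.length (pvUnvis_le_length _ _) root [] ord]
  simp only [pvDfsIter, pvDfs1]

-- ===== VERDICT
-- pass 1: both ports fold the same step function over the airports
lemma pvPass1_eq (g : PySem.Dict String (List String)) (hGood : pvGood g)
    (lst : List String) (init : PySem.Set String × List String) :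
    lst.foldl (fun st airport => if airport ∈ st.1 then st
      else pvDfsFrom g airport st.1 st.2) init =
    lst.foldl (fun st airport => if airport ∈ st.1 then st
      else pvDfs1 g (g.keys.length + 1) airport st.1 st.2) init := by
  apply PySem.List.foldl_congr_mem
  intro acc x hx
  by_cases h : x ∈ acc.1
  · simp [h]
  · simp only [if_neg h]
    exact pvDfsFrom_eq_dfs1 g hGood x acc.1 acc.2

-- pass 1 invariants: visited stays inside the keys, the finish stack has the same
-- members as visited, and every processed airport ends up visited
lemma pvPass1_props (g : PySem.Dict String (List String)) (hGood : pvGood g) :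
    ∀ (lst : List String), (∀ x ∈ lst, x ∈ g.keys) →
    ∀ (v : PySem.Set String) (ord : List String),
    (∀ x ∈ v, x ∈ g.keys) → (∀ x, x ∈ ord ↔ x ∈ v) →
    ∃ v' ord',
      lst.foldl (fun st airport => if airport ∈ st.1 then st
        else pvDfs1 g (g.keys.length + 1) airport st.1 st.2) (v, ord) = (v', ord') ∧
      (∀ x ∈ v', x ∈ g.keys) ∧ (∀ x, x ∈ ord' ↔ x ∈ v') ∧
      (∀ x ∈ v, x ∈ v') ∧ (∀ x ∈ lst, x ∈ v') := by
  intro lst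
  induction lst with
  | nil =>
      intro _ v ord hv hord
      exact ⟨v, ord, rfl, hv, hord, fun x hx => hx, by simp⟩
  | cons a t ih =>
      intro hlst v ord hv hord
      have hak : a ∈ g.keys := hlst a (by simp)
      have ht : ∀ x ∈ t, x ∈ g.keys := fun x hx => hlst x (by simp [hx])
      by_cases ha : a ∈ v
      · obtain ⟨v', ord', heq, h1, h2, h3, h4⟩ := ih ht v ord hv hord
        refine ⟨v', ord', by simpa [ha] using heq, h1, h2, h3, ?_⟩
        intro x hx
        rcases List.mem_cons.1 hx with rfl | hx
        · exact h3 x ha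
        · exact h4 x hx
      · obtain ⟨π, δ, e1, _, e3, e4, e5⟩ :=
          pvShape_dfs g hGood a v ord PySem.Set.empty hak ha
            (by intro x hx; simp [PySem.Set.empty] at hx)
        obtain ⟨v', ord', heq, h1, h2, h3, h4⟩ := ih ht (v ++ π) (ord ++ δ)
          (by intro x hx
              rcases List.mem_append.1 hx with h | h
              · exact hv x h
              · exact (e4 x h).1)
          (by intro x
              simp only [List.mem_append]
              rw [hord, e3 x])
        refine ⟨v', ord', ?_, h1, h2, ?_, ?_⟩
        · rw [List.foldl_cons, if_neg ha, e1]
          exact heq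
        · intro x hx
          exact h3 x (List.mem_append.2 (Or.inl hx))
        · intro x hx
          rcases List.mem_cons.1 hx with rfl | hx
          · exact h3 x (List.mem_append.2 (Or.inr e5))
          · exact h4 x hx

-- pass 2: B's tree counter counts exactly A's emitted components
lemma pvPass2_eq (g : PySem.Dict String (List String)) (hGood : pvGood g) :
    ∀ (lst : List String), (∀ x ∈ lst, x ∈ g.keys) →
    ∀ (v : PySem.Set String) (sccs : List (PySem.Set String)),
    lst.foldl (fun st node => if node ∈ st.1 then st
        else ((pvDfsFrom g node st.1 []).1, st.2 + 1)) (v, (sccs.length : Int)) =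
      ((pvPass2 g (g.keys.length + 1) lst v sccs).1,
       ((pvPass2 g (g.keys.length + 1) lst v sccs).2.length : Int)) := by
  intro lst
  induction lst with
  | nil => intro _ v sccs; simp [pvPass2]
  | cons a t ih =>
      intro hlst v sccs
      have hak : a ∈ g.keys := hlst a (by simp)
      have ht : ∀ x ∈ t, x ∈ g.keys := fun x hx => hlst x (by simp [hx])
      by_cases ha : a ∈ v
      · rw [List.foldl_cons, if_pos ha]
        rw [show pvPass2 g (g.keys.length + 1) (a :: t) v sccs
            = pvPass2 g (g.keys.length + 1) t v sccs from by
          simp only [pvPass2, if_pos ha]]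
        exact ih ht v sccs
      · obtain ⟨π, δ, e1, e2, e3, e4, e5⟩ :=
          pvShape_dfs g hGood a v [] PySem.Set.empty hak ha
            (by intro x hx; simp [PySem.Set.empty] at hx)
        have hfrom : (pvDfsFrom g a v []).1 = v ++ π := by
          rw [pvDfsFrom_eq_dfs1 g hGood a v [], e1]
        have hpass : pvPass2 g (g.keys.length + 1) (a :: t) v sccs
            = pvPass2 g (g.keys.length + 1) t (v ++ π)
                (sccs ++ [PySem.Set.empty ++ π]) := by
          simp only [pvPass2, if_neg ha, e2]
        rw [List.foldl_cons, if_neg ha, hfrom, hpass]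
        have := ih ht (v ++ π) (sccs ++ [PySem.Set.empty ++ π])
        simp only [List.length_append, List.length_singleton] at this
        push_cast at this
        exact this

-- pass 2 invariants: visited = union of the emitted components, which are
-- pairwise disjoint, nonempty and made of keys; every processed node gets visited
lemma pvPass2_props (g : PySem.Dict String (List String)) (hGood : pvGood g) :
    ∀ (lst : List String), (∀ x ∈ lst, x ∈ g.keys) →
    ∀ (v : PySem.Set String) (sccs : List (PySem.Set String)),
    (∀ x ∈ v, x ∈ g.keys) →
    (∀ x, x ∈ v ↔ ∃ c ∈ sccs, x ∈ c) →
    sccs.Pairwise (fun c d => ∀ x, x ∈ c → x ∉ d) →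
    (∀ c ∈ sccs, ∃ y, y ∈ c) →
    (∀ x ∈ (pvPass2 g (g.keys.length + 1) lst v sccs).1, x ∈ g.keys) ∧
    (∀ x, x ∈ (pvPass2 g (g.keys.length + 1) lst v sccs).1 ↔
      ∃ c ∈ (pvPass2 g (g.keys.length + 1) lst v sccs).2, x ∈ c) ∧
    (pvPass2 g (g.keys.length + 1) lst v sccs).2.Pairwise (fun c d => ∀ x, x ∈ c → x ∉ d) ∧
    (∀ c ∈ (pvPass2 g (g.keys.length + 1) lst v sccs).2, ∃ y, y ∈ c) ∧
    (∀ x ∈ lst, x ∈ (pvPass2 g (g.keys.length + 1) lst v sccs).1) ∧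
    (∀ x ∈ v, x ∈ (pvPass2 g (g.keys.length + 1) lst v sccs).1) := by
  intro lst
  induction lst with
  | nil =>
      intro _ v sccs hv hI hP hN
      exact ⟨hv, hI, hP, hN, by simp [pvPass2], by simp [pvPass2]⟩
  | cons a t ih =>
      intro hlst v sccs hv hI hP hN
      have hak : a ∈ g.keys := hlst a (by simp)
      have ht : ∀ x ∈ t, x ∈ g.keys := fun x hx => hlst x (by simp [hx])
      by_cases ha : a ∈ v
      · rw [show pvPass2 g (g.keys.length + 1) (a :: t) v sccs
            = pvPass2 g (g.keys.length + 1) t v sccs from by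
          simp only [pvPass2, if_pos ha]]
        obtain ⟨h1, h2, h3, h4, h5, h6⟩ := ih ht v sccs hv hI hP hN
        refine ⟨h1, h2, h3, h4, ?_, h6⟩
        intro x hx
        rcases List.mem_cons.1 hx with rfl | hx
        · exact h6 x ha
        · exact h5 x hx
      · obtain ⟨π, δ, e1, e2, e3, e4, e5⟩ :=
          pvShape_dfs g hGood a v [] PySem.Set.empty hak ha
            (by intro x hx; simp [PySem.Set.empty] at hx)
        rw [show pvPass2 g (g.keys.length + 1) (a :: t) v sccs
            = pvPass2 g (g.keys.length + 1) t (v ++ π)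
                (sccs ++ [PySem.Set.empty ++ π]) from by
          simp only [pvPass2, if_neg ha, e2]]
        obtain ⟨h1, h2, h3, h4, h5, h6⟩ := ih ht (v ++ π) (sccs ++ [PySem.Set.empty ++ π])
          (by intro x hx
              rcases List.mem_append.1 hx with h | h
              · exact hv x h
              · exact (e4 x h).1)
          (by intro x
              simp only [List.mem_append, List.mem_singleton]
              constructor
              · rintro (h | h)
                · obtain ⟨c, hc, hxc⟩ := (hI x).1 h
                  exact ⟨c, Or.inl hc, hxc⟩
                · exact ⟨PySem.Set.empty ++ π, Or.inr rfl, by simpa [PySem.Set.empty] using h⟩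
              · rintro ⟨c, hc | rfl, hxc⟩
                · exact Or.inl ((hI x).2 ⟨c, hc, hxc⟩)
                · exact Or.inr (by simpa [PySem.Set.empty] using hxc))
          (by rw [List.pairwise_append]
              refine ⟨hP, by simp, ?_⟩
              intro c hc d hd x hxc
              rw [List.mem_singleton] at hd
              subst hd
              intro hxd
              have hxv : x ∈ v := (hI x).2 ⟨c, hc, hxc⟩
              exact (e4 x (by simpa [PySem.Set.empty] using hxd)).2 hxv)
          (by intro c hc
              rcases List.mem_append.1 hc with h | h
              · exact hN c h
              · rw [List.mem_singleton] at h
                subst h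
                exact ⟨a, by simpa [PySem.Set.empty] using e5⟩)
        refine ⟨h1, h2, h3, h4, ?_, ?_⟩
        · intro x hx
          rcases List.mem_cons.1 hx with rfl | hx
          · exact h6 x (List.mem_append.2 (Or.inr e5))
          · exact h5 x hx
        · intro x hx
          exact h6 x (List.mem_append.2 (Or.inl hx))

-- counting components different from scc0 when all components are pairwise disjoint
lemma pvCount_all_ne (scc0 : PySem.Set String) :
    ∀ (L : List (PySem.Set String)) (k : Int),
    (∀ c ∈ L, PySem.Set.equal c scc0 = false) →
    L.foldl (fun n c => if PySem.Set.equal c scc0 then n else n + 1) k = k + L.length := by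
  intro L
  induction L with
  | nil => intro k _; simp
  | cons c t ih =>
      intro k hc
      rw [List.foldl_cons, if_neg (by simp [hc c (by simp)])]
      rw [ih (k + 1) (fun d hd => hc d (by simp [hd]))]
      simp only [List.length_cons]
      push_cast
      ring

lemma pvCount_neq (x0 : String) (scc0 : PySem.Set String) (hx : x0 ∈ scc0) :
    ∀ (L : List (PySem.Set String)) (k : Int), scc0 ∈ L →
    L.Pairwise (fun c d => ∀ x, x ∈ c → x ∉ d) →
    L.foldl (fun n c => if PySem.Set.equal c scc0 then n else n + 1) k
      = k + L.length - 1 := by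
  intro L
  induction L with
  | nil => intro k h; simp at h
  | cons c t ih =>
      intro k hmem hP
      rw [List.pairwise_cons] at hP
      obtain ⟨hcd, hPt⟩ := hP
      by_cases hc : PySem.Set.equal c scc0 = true
      · have hiff := (PySem.Set.equal_iff c scc0).1 hc
        have hall : ∀ d ∈ t, PySem.Set.equal d scc0 = false := by
          intro d hd
          by_contra hne
          rw [Bool.not_eq_false] at hne
          have hiffd := (PySem.Set.equal_iff d scc0).1 hne
          exact hcd d hd x0 ((hiff x0).2 hx) ((hiffd x0).2 hx)
        rw [List.foldl_cons, if_pos hc, pvCount_all_ne scc0 t k hall]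
        simp only [List.length_cons]
        push_cast
        ring
      · have hmt : scc0 ∈ t := by
          rcases List.mem_cons.1 hmem with rfl | h
          · exact absurd ((PySem.Set.equal_iff _ _).2 (fun x => Iff.rfl)) hc
          · exact h
        rw [List.foldl_cons, if_neg hc, ih (k + 1) hmt hPt]
        simp only [List.length_cons]
        push_cast
        ring

-- ===== VERDICT (by name: the statement is the Claim_ definition above) =====
theorem airport_connections_spec : Claim_equal_airport_connections := by
  intro airports routes s hDom hPre
  unfold Spec_airport_connections
  obtain ⟨hkeys, hGood⟩ := pvGraph_facts airports routes hPre
  simp only [airport_connections, airport_connections_alt]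
  set g := pvAddRoutes (pvBuildGraph airports) routes with hg
  have hlstA : ∀ x ∈ airports, x ∈ g.keys := fun x hx => (hkeys x).2 hx
  rw [pvPass1_eq g hGood airports (PySem.Set.empty, [])]
  obtain ⟨V1, ORD, hp1, hV1k, hOrdV, _, hAll⟩ :=
    pvPass1_props g hGood airports hlstA PySem.Set.empty []
      (by intro x hx; simp [PySem.Set.empty] at hx)
      (by intro x; simp [PySem.Set.empty])
  rw [hp1]
  simp only []
  have hrevk : ∀ x ∈ ORD.reverse, x ∈ g.keys := by
    intro x hx
    exact hV1k x ((hOrdV x).1 (List.mem_reverse.1 hx))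
  have hp2 := pvPass2_eq g hGood ORD.reverse hrevk PySem.Set.empty []
  simp only [List.length_nil, Nat.cast_zero] at hp2
  rw [hp2]
  obtain ⟨hRk, hRI, hRP, hRN, hRall, _⟩ :=
    pvPass2_props g hGood ORD.reverse hrevk PySem.Set.empty []
      (by intro x hx; simp [PySem.Set.empty] at hx)
      (by intro x; constructor
          · intro hx; simp [PySem.Set.empty] at hx
          · rintro ⟨c, hc, _⟩; simp at hc)
      (by simp) (by simp)
  by_cases hs : s ∈ g.keys
  · have hcont : PySem.Dict.contains g s = true := (PySem.Dict.contains_iff_mem_keys g s).2 hs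
    rw [if_pos hcont]
    have hsV1 : s ∈ V1 := hAll s ((hkeys s).1 hs)
    have hsR : s ∈ (pvPass2 g (g.keys.length + 1) ORD.reverse PySem.Set.empty []).1 :=
      hRall s (List.mem_reverse.2 ((hOrdV s).2 hsV1))
    obtain ⟨c, hcR, hsc⟩ := (hRI s).1 hsR
    cases hfind : (pvPass2 g (g.keys.length + 1) ORD.reverse PySem.Set.empty []).2.find?
        (fun scc => PySem.Set.contains scc s) with
    | none =>
        exfalso
        exact (List.find?_eq_none.1 hfind c hcR) ((PySem.Set.contains_iff c s).2 hsc)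
    | some scc0 =>
        have hm0 := List.mem_of_find?_eq_some hfind
        have hs0 : s ∈ scc0 := by
          have := List.find?_some hfind
          exact (PySem.Set.contains_iff scc0 s).1 this
        have hne : scc0.isEmpty = false := by
          cases scc0
          · simp at hs0
          · simp
        simp only [hne, Bool.false_eq_true, if_false]
        rw [pvCount_neq s scc0 hs0 _ 0 hm0 hRP]
        omega
  · have hcont : PySem.Dict.contains g s = false := by
      rw [← Bool.not_eq_true, PySem.Dict.contains_iff_mem_keys]
      exact hs
    rw [if_neg (by simp [hcont])]
    have hnone : (pvPass2 g (g.keys.length + 1) ORD.reverse PySem.Set.empty []).2.find?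
        (fun scc => PySem.Set.contains scc s) = none := by
      rw [List.find?_eq_none]
      intro c hcR hcon
      exact hs (hRk s ((hRI s).2 ⟨c, hcR, (PySem.Set.contains_iff c s).1 hcon⟩))
    rw [hnone]
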